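-- pv_equiv track=rewrite | github.com/Jeff-git-li/logistar-platform | gateway/app.py | _build_filtered_columns
-- ===== SOURCE A (Python) =====
-- def _build_filtered_columns(original_column_names, excluded_columns):
--     """Helper: Build list of columns starting from Service Type, excluding discounts.
--
--     Args:
--         original_column_names: List of all column names in order
--         excluded_columns: Set of columns to exclude
--
--     Returns:
--         List of filtered column names
--     """
--     all_original_columns = []
--     service_type_found = False
--
--     for col_name in original_column_names:
--         if service_type_found:
--             if col_name not in excluded_columns:
--                 all_original_columns.append(col_name)
--         elif col_name == 'Service Type':
--             service_type_found = True
--             all_original_columns.append(col_name)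
--
--     return all_original_columns
-- ===== SOURCE B (Python) =====
-- def _build_filtered_columns(original_column_names, excluded_columns):
--     """Locate 'Service Type', then slice-and-filter (no stateful flag pass)."""
--     if 'Service Type' not in original_column_names:
--         return []
--     rest = original_column_names[original_column_names.index('Service Type'):]
--     return rest[:1] + [c for c in rest[1:] if c not in excluded_columns]
-- ===== Notes on version B (the rewrite author's own statement) =====
-- stated objective: simpler
-- what changed: Replaces the stateful found-flag loop by locate-the-pivot (index), slice from it, and a single filter comprehension over the remainder.
import Mathlib
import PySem

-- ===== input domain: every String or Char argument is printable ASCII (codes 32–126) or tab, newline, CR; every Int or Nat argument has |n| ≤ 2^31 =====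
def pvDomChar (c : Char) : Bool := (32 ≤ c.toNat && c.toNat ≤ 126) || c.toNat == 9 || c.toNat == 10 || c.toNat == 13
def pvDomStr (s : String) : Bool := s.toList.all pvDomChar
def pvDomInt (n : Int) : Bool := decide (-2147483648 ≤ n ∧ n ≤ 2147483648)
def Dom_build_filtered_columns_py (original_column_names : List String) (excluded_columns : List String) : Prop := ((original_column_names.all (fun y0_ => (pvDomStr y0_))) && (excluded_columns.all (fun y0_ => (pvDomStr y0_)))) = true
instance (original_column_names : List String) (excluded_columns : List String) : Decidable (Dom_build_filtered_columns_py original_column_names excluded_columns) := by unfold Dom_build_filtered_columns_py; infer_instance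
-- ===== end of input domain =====

-- ===== PORT A =====
-- B replaces A's stateful found-flag pass by locate-then-slice-then-filter (objective: simpler).
def build_filtered_columns_py (original_column_names : List String) (excluded_columns : List String) : List String :=
  (original_column_names.foldl
    (fun (st : List String × Bool) col =>
      if st.2 then
        if excluded_columns.contains col then st else (st.1 ++ [col], st.2)
      else if col = "Service Type" then (st.1 ++ [col], true)
      else st)
    ([], false)).1

-- ===== PORT B =====
def build_filtered_columns_py_alt (original_column_names : List String) (excluded_columns : List String) : List String :=
  if "Service Type" ∈ original_column_names then
    match PySem.List.index? original_column_names "Service Type" with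
    | none => []  -- unreachable: membership was checked above
    | some i =>
      let rest := PySem.List.slice original_column_names (some (i : Int)) none
      PySem.List.slice rest none (some 1) ++
        (PySem.List.slice rest (some 1) none).filter (fun c => ! excluded_columns.contains c)
  else []

-- ===== PRECONDITION & SPEC =====
def Spec_build_filtered_columns_py (original_column_names : List String) (excluded_columns : List String) (out : List String) : Prop := out = build_filtered_columns_py_alt original_column_names excluded_columns
instance (original_column_names : List String) (excluded_columns : List String) (out : List String) : Decidable (Spec_build_filtered_columns_py original_column_names excluded_columns out) := by unfold Spec_build_filtered_columns_py; infer_instance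

-- ===== CLAIM (what is proved, stated in full; the proofs are below) =====
def Claim_equal_build_filtered_columns_py : Prop := ∀ (original_column_names : List String) (excluded_columns : List String), Dom_build_filtered_columns_py original_column_names excluded_columns → Spec_build_filtered_columns_py original_column_names excluded_columns (build_filtered_columns_py original_column_names excluded_columns)

-- ===== LEMMAS AND PROOFS =====

-- A's loop body, abbreviated for the lemmas.
def pvStepA (excluded_columns : List String) (st : List String × Bool) (col : String) : List String × Bool :=
  if st.2 then
    if excluded_columns.contains col then st else (st.1 ++ [col], st.2)
  else if col = "Service Type" then (st.1 ++ [col], true)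
  else st

theorem pvFoldA_found (excluded_columns : List String) (cols : List String) (acc : List String) :
    (cols.foldl (pvStepA excluded_columns) (acc, true)).1
      = acc ++ cols.filter (fun c => ! excluded_columns.contains c) := by
  induction cols generalizing acc with
  | nil => simp
  | cons c cs ih =>
    by_cases h : c ∈ excluded_columns <;>
      simp [List.foldl, pvStepA, h, ih]

theorem pvAlt_of_notMem (original_column_names excluded_columns : List String)
    (h : "Service Type" ∉ original_column_names) :
    build_filtered_columns_py_alt original_column_names excluded_columns = [] := by
  simp [build_filtered_columns_py_alt, h]

theorem pvAlt_cons_self (cs excluded_columns : List String) :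
    build_filtered_columns_py_alt ("Service Type" :: cs) excluded_columns
      = "Service Type" :: cs.filter (fun c => ! excluded_columns.contains c) := by
  unfold build_filtered_columns_py_alt
  rw [if_pos (List.mem_cons_self), PySem.List.index?_cons_self]
  simp only [PySem.List.slice_from_natCast, List.drop_zero, PySem.List.slice_from_one]
  rw [show (1 : Int) = ((1 : Nat) : Int) from rfl, PySem.List.slice_to_natCast]
  rfl

theorem pvAlt_cons_ne (c : String) (cs excluded_columns : List String)
    (hc : c ≠ "Service Type") :
    build_filtered_columns_py_alt (c :: cs) excluded_columns
      = build_filtered_columns_py_alt cs excluded_columns := by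
  by_cases hm : "Service Type" ∈ cs
  · rcases Option.isSome_iff_exists.mp ((PySem.List.index?_isSome_iff cs "Service Type").mpr hm) with ⟨i, hi⟩
    have hcons : PySem.List.index? (c :: cs) "Service Type" = some (i + 1) := by
      rw [PySem.List.index?_cons_of_ne cs hc, hi]; rfl
    unfold build_filtered_columns_py_alt
    rw [if_pos (List.mem_cons_of_mem c hm), if_pos hm, hcons, hi]
    simp only [PySem.List.slice_from_natCast]
    rw [List.drop_succ_cons]
  · have hm' : "Service Type" ∉ c :: cs := by
      intro h; rcases List.mem_cons.mp h with h | h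
      · exact hc h.symm
      · exact hm h
    rw [pvAlt_of_notMem _ _ hm', pvAlt_of_notMem _ _ hm]

theorem build_filtered_columns_eq (original_column_names excluded_columns : List String) :
    build_filtered_columns_py original_column_names excluded_columns
      = build_filtered_columns_py_alt original_column_names excluded_columns := by
  induction original_column_names with
  | nil => rfl
  | cons c cs ih =>
    by_cases hc : c = "Service Type"
    · subst hc
      show (List.foldl (pvStepA excluded_columns) (["Service Type"], true) cs).1 = _
      rw [pvFoldA_found, pvAlt_cons_self]
      rfl
    · have hA : build_filtered_columns_py (c :: cs) excluded_columns
          = build_filtered_columns_py cs excluded_columns := by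
        show (List.foldl (pvStepA excluded_columns) (pvStepA excluded_columns ([], false) c) cs).1
            = (List.foldl (pvStepA excluded_columns) ([], false) cs).1
        rw [show pvStepA excluded_columns ([], false) c = ([], false) from by simp [pvStepA, hc]]
      rw [hA, ih, pvAlt_cons_ne c cs excluded_columns hc]

-- ===== VERDICT (by name: the statement is the Claim_ definition above) =====
theorem build_filtered_columns_py_spec : Claim_equal_build_filtered_columns_py := by
  intro cols excl _
  exact build_filtered_columns_eq cols excl
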